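-- pv_equiv track=rewrite | github.com/kr4g/Klotho | allopy/topos/sequences/sequences.py | inf_num
-- ===== SOURCE A (Python) =====
-- def inf_num(n):
--     '''
--     Computes the infinite number for a given integer `n` by converting it to binary,
--     filtering left zeros, and then applying the infinity digits transformation.
--
--     based on: https://github.com/smoge/InfinitySeries.git
--
--     '''
--     def _infinity_digits(s):
--         '''
--         Applies the infinity digits transformation to a string `s` of binary digits.
--         '''
--         output = 0
--         for char in s:
--             if char == '0':
--                 output *= -1
--             elif char == '1':
--                 output += 1
--         return output
--
--     def _filter_left_zeros(binary_str):
--         '''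
--         Filters out leading zeros from a binary string `binary_str`.
--         '''
--         return binary_str.lstrip('0') # remove leading zeros
--
--     binary_str = bin(n)[2:] # remove the '0b' prefix
--     filtered_binary_str = _filter_left_zeros(binary_str)
--     filtered_digits = list(filtered_binary_str)
--     return _infinity_digits(filtered_digits)
-- ===== SOURCE B (Python) =====
-- def inf_num(n):
--     # Block decomposition: split the binary digits of |n| on '0' and fold
--     # result = len(block) - result over the blocks; each '1' then contributes
--     # (-1)^(number of '0's to its right), matching A's negate/increment fold
--     # (A ignores the 'b' of bin(negative) so A(n) = A(|n|)).
--     result = 0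
--     for block in bin(abs(n))[2:].split('0'):
--         result = len(block) - result
--     return result
-- ===== Notes on version B (the rewrite author's own statement) =====
-- stated objective: alternative
-- what changed: Replaces A's per-character negate/increment fold over the stripped binary string by splitting the binary digits of |n| on '0' into blocks of ones and folding result = len(block) - result over the blocks.
import Mathlib
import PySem

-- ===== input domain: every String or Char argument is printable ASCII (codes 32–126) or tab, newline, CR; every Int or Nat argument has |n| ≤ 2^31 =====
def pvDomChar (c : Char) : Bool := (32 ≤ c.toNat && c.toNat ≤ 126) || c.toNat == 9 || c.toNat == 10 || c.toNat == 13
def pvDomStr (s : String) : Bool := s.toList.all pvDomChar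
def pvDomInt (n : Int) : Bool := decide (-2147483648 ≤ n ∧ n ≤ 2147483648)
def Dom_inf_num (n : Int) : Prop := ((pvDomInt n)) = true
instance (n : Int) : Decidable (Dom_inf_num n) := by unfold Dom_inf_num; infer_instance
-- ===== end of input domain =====

-- B replaces A's per-character negate/increment fold over the stripped binary string by a
-- block decomposition: split the binary digits of |n| on '0' and fold result = len(block) - result
-- (alternative decomposition, same cost).


-- ===== PORT A =====
-- A-side helper: body of the '_infinity_digits' loop (output *= -1 on '0', output += 1 on '1').
def infStep (output : Int) (ch : Char) : Int :=
  if ch == '0' then output * (-1) else if ch == '1' then output + 1 else output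

def inf_num (n : Int) : Int :=
  -- bin(n)[2:] : pyBin's chars with the first two dropped (slice [2:] from a nonnegative start = drop 2, exact)
  let binaryStr : List Char := (PySem.Int.toBinChars0b n).drop 2
  -- _filter_left_zeros: lstrip('0') = drop leading '0' characters (exact for a single strip char)
  let filteredBinaryStr : List Char := binaryStr.dropWhile (· == '0')
  -- _infinity_digits over list(filtered_binary_str)
  filteredBinaryStr.foldl infStep 0

-- ===== PORT B =====
-- B-side helper: body of B's block loop, result = len(block) - result.
def blockStep (result : Int) (block : List Char) : Int :=
  PySem.List.len block - result

def inf_num_alt (n : Int) : Int :=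
  -- for block in bin(abs(n))[2:].split('0'): result = len(block) - result
  -- (str.split('0') on a string = List.splitOn '0' on its characters, exact for a 1-char separator)
  (((PySem.Int.toBinChars0b |n|).drop 2).splitOn '0').foldl blockStep 0

-- ===== PRECONDITION & SPEC =====
def Spec_inf_num (n : Int) (out : Int) : Prop := out = inf_num_alt n
instance (n : Int) (out : Int) : Decidable (Spec_inf_num n out) := by unfold Spec_inf_num; infer_instance

-- ===== CLAIM (what is proved, stated in full; the proofs are below) =====
def Claim_equal_inf_num : Prop := ∀ (n : Int), Dom_inf_num n → Spec_inf_num n (inf_num n)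

-- ===== LEMMAS AND PROOFS =====

/-- Every character `Nat.toDigits 2` produces is a binary digit. -/
lemma toDigits_two_binary (f m : Nat) (ds : List Char) (hds : ∀ c ∈ ds, c = '0' ∨ c = '1') :
    ∀ c ∈ Nat.toDigitsCore 2 f m ds, c = '0' ∨ c = '1' := by
  induction f generalizing m ds with
  | zero => simpa [Nat.toDigitsCore] using hds
  | succ f ih =>
    have hdig : Nat.digitChar (m % 2) = '0' ∨ Nat.digitChar (m % 2) = '1' := by
      rcases Nat.mod_two_eq_zero_or_one m with h | h <;> simp [h, Nat.digitChar]
    have hds' : ∀ c ∈ Nat.digitChar (m % 2) :: ds, c = '0' ∨ c = '1' := by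
      intro c hc
      rcases List.mem_cons.mp hc with h | h
      · exact h ▸ hdig
      · exact hds c h
    simp only [Nat.toDigitsCore]
    split
    · exact hds'
    · exact ih (m / 2) _ hds'

/-- Leading zeros do not change A's fold started from 0. -/
lemma foldl_infStep_dropWhile (t : List Char) :
    (t.dropWhile (· == '0')).foldl infStep 0 = t.foldl infStep 0 := by
  induction t with
  | nil => rfl
  | cons c t ih =>
    by_cases h : c = '0'
    · subst h
      simpa [List.dropWhile, infStep] using ih
    · have hb : (c == '0') = false := by simp [h]
      simp [List.dropWhile, hb]

/-- Core identity: B's block fold over `t.splitOn '0'`, started at `-a`, equals A's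
    character fold over `t` started at `a`, for binary strings `t`. -/
lemma blockStep_splitOn (t : List Char) (a : Int)
    (ht : ∀ c ∈ t, c = '0' ∨ c = '1') :
    (t.splitOn '0').foldl blockStep (-a) = t.foldl infStep a := by
  induction t generalizing a with
  | nil => simp [List.splitOn, blockStep, PySem.List.len]
  | cons c t ih =>
    have ht' : ∀ c ∈ t, c = '0' ∨ c = '1' := fun c hc => ht c (List.mem_cons_of_mem _ hc)
    rcases ht c List.mem_cons_self with h0 | h1
    · subst h0
      have : (('0' :: t).splitOn '0') = [] :: t.splitOn '0' := by
        simp [List.splitOn, List.splitOnP_cons]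
      rw [this, List.foldl_cons]
      have hb : blockStep (-a) ([] : List Char) = -(-a) := by
        simp [blockStep, PySem.List.len]
      rw [hb, ih (-a) ht']
      simp [infStep]
    · subst h1
      obtain ⟨h, tl, hsplit⟩ : ∃ h tl, t.splitOn '0' = h :: tl := by
        rcases hx : t.splitOn '0' with _ | ⟨h, tl⟩
        · exact absurd hx (List.splitOnP_ne_nil _ _)
        · exact ⟨h, tl, rfl⟩
      have hsplit' : List.splitOnP (· == '0') t = h :: tl := hsplit
      have : (('1' :: t).splitOn '0') = ('1' :: h) :: tl := by
        simp [List.splitOn, List.splitOnP_cons, hsplit']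
      rw [this, List.foldl_cons]
      have hstep : blockStep (-a) ('1' :: h) = PySem.List.len h - (-(a + 1)) := by
        simp [blockStep, PySem.List.len]; ring
      rw [hstep]
      have := ih (a + 1) ht'
      rw [hsplit, List.foldl_cons] at this
      have hb : blockStep (-(a + 1)) h = PySem.List.len h - (-(a + 1)) := rfl
      rw [hb] at this
      rw [this]
      simp [infStep]

-- ===== VERDICT (by name: the statement is the Claim_ definition above) =====
theorem inf_num_spec : Claim_equal_inf_num := by
  intro n _
  simp only [Spec_inf_num, inf_num, inf_num_alt]
  by_cases hn : n < 0
  · -- bin(n) = "-0b…": A folds over 'b' :: digits, B over digits of |n|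
    have habs : ¬ (|n| < 0) := not_lt.mpr (abs_nonneg n)
    have hA : (PySem.Int.toBinChars0b n).drop 2 = 'b' :: Nat.toDigits 2 n.natAbs := by
      simp [PySem.Int.toBinChars0b, hn]
    have hB : (PySem.Int.toBinChars0b |n|).drop 2 = Nat.toDigits 2 n.natAbs := by
      have h1 : |n|.toNat = n.natAbs := by
        rw [Int.abs_eq_natAbs]; exact Int.toNat_natCast _
      simp [PySem.Int.toBinChars0b, habs, h1]
    rw [hA, hB]
    have hbin : ∀ c ∈ Nat.toDigits 2 n.natAbs, c = '0' ∨ c = '1' :=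
      toDigits_two_binary _ _ [] (by simp)
    rw [show (('b' :: Nat.toDigits 2 n.natAbs).dropWhile (· == '0'))
          = 'b' :: Nat.toDigits 2 n.natAbs by simp [List.dropWhile]]
    rw [List.foldl_cons, show infStep 0 'b' = 0 from rfl,
        ← foldl_infStep_dropWhile, foldl_infStep_dropWhile]
    have := blockStep_splitOn (Nat.toDigits 2 n.natAbs) 0 hbin
    rw [neg_zero] at this
    exact this.symm
  · -- n ≥ 0: |n| = n, both sides work on the same digit string
    have habs : |n| = n := abs_of_nonneg (not_lt.mp hn)
    have hA : (PySem.Int.toBinChars0b n).drop 2 = Nat.toDigits 2 n.toNat := by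
      simp [PySem.Int.toBinChars0b, hn]
    rw [habs, hA]
    have hbin : ∀ c ∈ Nat.toDigits 2 n.toNat, c = '0' ∨ c = '1' :=
      toDigits_two_binary _ _ [] (by simp)
    rw [foldl_infStep_dropWhile]
    have := blockStep_splitOn (Nat.toDigits 2 n.toNat) 0 hbin
    rw [neg_zero] at this
    exact this.symm
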